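-- pv_equiv track=rewrite | github.com/hyunmoon-han/SQL_SORT | original.py | replace_parentheses_with_conditions
-- ===== SOURCE A (Python) =====
-- def replace_parentheses_with_conditions(sql):
--     simple_functions = ['SUM', 'MIN', 'MAX', 'COUNT', 'AVG', 'ABS', 'ROUND', 'LENGTH', 'TRIM','CAST']
--     stack = []  # 여는 괄호 위치를 저장할 스택
--     pairs = []  # 괄호 쌍을 저장할 리스트
--     modified_sql = list(sql)  # 문자열을 리스트로 변환 (수정 용이)
--
--     # 모든 괄호의 위치를 찾음
--     for i, char in enumerate(sql):
--         if char == '(':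
--             stack.append(i)  # 여는 괄호 위치 저장
--         elif char == ')':
--             if stack:
--                 start = stack.pop()  # 가장 안쪽 여는 괄호부터 처리
--                 pairs.append((start, i))  # 여는 괄호와 닫는 괄호의 위치 저장
--
--     # 괄호 쌍을 왼쪽에서 오른쪽으로 처리
--     for start, end in pairs:
--         inside_sql = "".join(modified_sql[start + 1:end])  # 괄호 내부 문자열 추출
--
--         # 괄호 앞에 특정 함수가 있다면 괄호 치환
--         for func in simple_functions:
--             # 괄호 앞에 해당 함수가 있는지 확인
--             if sql[(start - len(func))-1:start].strip().upper() == func: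
--                 # 함수 이름이 있을 경우 괄호를 ㄱ()와 ㄴ()로 치환
--                 modified_sql[start] = 'ㄱ '  # 여는 괄호를 ㄱ로 치환
--                 modified_sql[end] = ' ㄴ'  # 닫는 괄호를 ㄴ로 치환
--
--     return "".join(modified_sql)
-- ===== SOURCE B (Python) =====
-- def _matching_close(sql, i):
--     # forward scan from the '(' at i; returns the index of its matching ')', or None
--     depth = 1
--     for j in range(i + 1, len(sql)):
--         c = sql[j]
--         if c == '(':
--             depth += 1
--         elif c == ')':
--             depth -= 1
--             if depth == 0:
--                 return j
--     return None
--
--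
-- def replace_parentheses_with_conditions(sql):
--     simple_functions = ['SUM', 'MIN', 'MAX', 'COUNT', 'AVG', 'ABS', 'ROUND', 'LENGTH', 'TRIM', 'CAST']
--     out = list(sql)
--     for i, ch in enumerate(sql):
--         if ch != '(':
--             continue
--         if any(sql[(i - len(f)) - 1:i].strip().upper() == f for f in simple_functions):
--             j = _matching_close(sql, i)
--             if j is not None:
--                 out[i] = 'ㄱ '
--                 out[j] = ' ㄴ'
--     return ''.join(out)
-- ===== Notes on version B (the rewrite author's own statement) =====
-- stated objective: alternative
-- what changed: Instead of A's two passes (a stack builds a list of all paren pairs, then a second pass rewrites the function-prefixed ones), B makes a single pass over the string and, at each opening parenthesis whose prefix matches a function name, finds the matching closing parenthesis on demand by a forward depth-counting scan and rewrites both ends immediately; no stack and no pairs list are kept.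
import Mathlib
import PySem

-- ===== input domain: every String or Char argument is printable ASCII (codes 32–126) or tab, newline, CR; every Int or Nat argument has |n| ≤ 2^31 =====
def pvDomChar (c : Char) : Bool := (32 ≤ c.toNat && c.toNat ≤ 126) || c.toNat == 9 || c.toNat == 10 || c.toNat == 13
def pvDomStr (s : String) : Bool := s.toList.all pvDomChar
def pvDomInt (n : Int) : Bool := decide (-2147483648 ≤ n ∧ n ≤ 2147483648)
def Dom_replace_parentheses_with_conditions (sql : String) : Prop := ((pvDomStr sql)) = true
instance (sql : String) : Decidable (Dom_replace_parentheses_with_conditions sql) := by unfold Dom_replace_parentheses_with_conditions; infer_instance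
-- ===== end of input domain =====

-- B replaces A's two passes (stack-built pair list, then a replacement pass) by a single pass
-- that, at each function-prefixed opening parenthesis, finds the matching closing one by an
-- on-demand forward depth scan (objective: alternative algorithm of similar cost; no speed claim).

-- ===== PORT A =====
-- shared with port B because both Python sources contain the identical literal check
-- `sql[(start - len(func)) - 1:start].strip().upper() == func` and the identical function list.
def pvFuncs : List String :=
  ["SUM", "MIN", "MAX", "COUNT", "AVG", "ABS", "ROUND", "LENGTH", "TRIM", "CAST"]

def pvChk (cs : List Char) (start : Nat) (f : String) : Bool :=
  PySem.Chars.upper (PySem.Chars.strip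
      (PySem.List.slice cs (some ((start : Int) - (f.toList.length : Int) - 1)) (some (start : Int))))
    == f.toList

-- the `for i, char in enumerate(sql)` loop: stack of open positions, pair list appended on pop
-- (Python's enumerate indices are the nonnegative positions 0,1,2,…, carried here as the Nat i)
def pvScanPairs : List Char → Nat → List Nat → List (Nat × Nat) → List (Nat × Nat)
  | [], _, _, pairs => pairs
  | c :: rest, i, stack, pairs =>
    if c = '(' then pvScanPairs rest (i + 1) (i :: stack) pairs
    else if c = ')' then
      match stack with
      | [] => pvScanPairs rest (i + 1) [] pairs
      | s :: stack' => pvScanPairs rest (i + 1) stack' (pairs ++ [(s, i)])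
    else pvScanPairs rest (i + 1) stack pairs

def replace_parentheses_with_conditions (sql : String) : String :=
  let cs := sql.toList
  let pairs := pvScanPairs cs 0 [] []
  let modified0 : List (List Char) := cs.map (fun c => [c])   -- list(sql)
  let modified := pairs.foldl (fun m p =>
    -- inside_sql is computed by A but never used
    let _inside := (PySem.List.slice m (some ((p.1 : Int) + 1)) (some (p.2 : Int))).flatten
    pvFuncs.foldl (fun m f =>
      if pvChk cs p.1 f then (m.set p.1 ['ㄱ', ' ']).set p.2 [' ', 'ㄴ'] else m) m) modified0
  String.ofList modified.flatten   -- "".join(modified_sql)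

-- ===== PORT B =====
-- `_matching_close(sql, i)`: forward scan with a depth counter from the open paren at position i
def pvFindClose (cs : List Char) (j : Nat) (depth : Int) : Option Nat :=
  if h : j < cs.length then
    if cs[j] = '(' then pvFindClose cs (j + 1) (depth + 1)
    else if cs[j] = ')' then
      if depth - 1 = 0 then some j else pvFindClose cs (j + 1) (depth - 1)
    else pvFindClose cs (j + 1) depth
  else none
termination_by cs.length - j

-- the single `for i, ch in enumerate(sql)` loop of B, carrying the output list
def pvReplaceLoop (cs : List Char) : List Char → Nat → List (List Char) → List (List Char)
  | [], _, out => out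
  | c :: rest, i, out =>
    let out' :=
      if c = '(' then
        if pvFuncs.any (fun f => pvChk cs i f) then
          match pvFindClose cs (i + 1) 1 with
          | some j => (out.set i ['ㄱ', ' ']).set j [' ', 'ㄴ']
          | none => out
        else out
      else out
    pvReplaceLoop cs rest (i + 1) out'

def replace_parentheses_with_conditions_alt (sql : String) : String :=
  let cs := sql.toList
  let out := pvReplaceLoop cs cs 0 (cs.map (fun c => [c]))
  String.ofList out.flatten

-- ===== PRECONDITION & SPEC =====
def Spec_replace_parentheses_with_conditions (sql : String) (out : String) : Prop := out = replace_parentheses_with_conditions_alt sql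
instance (sql : String) (out : String) : Decidable (Spec_replace_parentheses_with_conditions sql out) := by unfold Spec_replace_parentheses_with_conditions; infer_instance

-- ===== CLAIM (what is proved, stated in full; the proofs are below) =====
def Claim_equal_replace_parentheses_with_conditions : Prop := ∀ (sql : String), Dom_replace_parentheses_with_conditions sql → Spec_replace_parentheses_with_conditions sql (replace_parentheses_with_conditions sql)

-- ===== LEMMAS AND PROOFS =====

-- the one-pair update both programs perform at a function-prefixed matched pair (start, end)
def pvUpd (m : List (List Char)) (p : Nat × Nat) : List (List Char) :=
  (m.set p.1 ['ㄱ', ' ']).set p.2 [' ', 'ㄴ']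

-- all indices touched by a pair list
def pvComps (P : List (Nat × Nat)) : List Nat := P.flatMap (fun p => [p.1, p.2])

def pvCond (cs : List Char) (s : Nat) : Bool := pvFuncs.any (fun f => pvChk cs s f)

-- `(s, e) are a matched pair` characterised by B's forward scan
def pvR (cs : List Char) (s e : Nat) : Prop :=
  cs[s]? = some '(' ∧ pvFindClose cs (s + 1) 1 = some e

theorem pvComps_mem (P : List (Nat × Nat)) (x : Nat) :
    x ∈ pvComps P ↔ ∃ q ∈ P, x = q.1 ∨ x = q.2 := by
  simp [pvComps]

-- ---- pvFindClose basics ----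
theorem pvFindClose_ge (cs : List Char) (j : Nat) (d : Int) (h : cs.length ≤ j) :
    pvFindClose cs j d = none := by
  rw [pvFindClose]; simp [Nat.not_lt.mpr h]

theorem pvFindClose_open (cs : List Char) (i : Nat) (d : Int) (h : cs[i]? = some '(') :
    pvFindClose cs i d = pvFindClose cs (i + 1) (d + 1) := by
  obtain ⟨hl, hc⟩ := List.getElem?_eq_some_iff.mp h
  rw [pvFindClose]; simp [hl, hc]

theorem pvFindClose_close_hit (cs : List Char) (i : Nat) (h : cs[i]? = some ')') :
    pvFindClose cs i 1 = some i := by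
  obtain ⟨hl, hc⟩ := List.getElem?_eq_some_iff.mp h
  rw [pvFindClose]; simp [hl, hc]

theorem pvFindClose_close (cs : List Char) (i : Nat) (d : Int) (h : cs[i]? = some ')')
    (hd : d ≠ 1) : pvFindClose cs i d = pvFindClose cs (i + 1) (d - 1) := by
  obtain ⟨hl, hc⟩ := List.getElem?_eq_some_iff.mp h
  rw [pvFindClose]; simp [hl, hc, sub_eq_zero, hd]

theorem pvFindClose_other (cs : List Char) (i : Nat) (d : Int) (c : Char) (h : cs[i]? = some c)
    (h1 : c ≠ '(') (h2 : c ≠ ')') : pvFindClose cs i d = pvFindClose cs (i + 1) d := by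
  obtain ⟨hl, hc⟩ := List.getElem?_eq_some_iff.mp h
  rw [pvFindClose]; simp [hl, hc, h1, h2]

theorem pvFindClose_facts (cs : List Char) (j : Nat) (d : Int) (e : Nat) :
    0 < d → pvFindClose cs j d = some e → j ≤ e ∧ e < cs.length ∧ cs[e]? = some ')' := by
  fun_induction pvFindClose cs j d with
  | case1 j d hlt hc ih =>
    intro hd h
    have := ih (by omega) h
    exact ⟨by omega, this.2⟩
  | case2 j d hlt hc1 hc2 hz =>
    intro hd h
    injection h with h; subst h
    exact ⟨le_refl _, hlt, List.getElem?_eq_some_iff.mpr ⟨hlt, hc2⟩⟩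
  | case3 j d hlt hc1 hc2 hz ih =>
    intro hd h
    have := ih (by omega) h
    exact ⟨by omega, this.2⟩
  | case4 j d hlt hc1 hc2 ih =>
    intro hd h
    have := ih hd h
    exact ⟨by omega, this.2⟩
  | case5 j d hlt =>
    intro _ h; cases h

-- ---- the scan invariant ----
structure PvInv (cs : List Char) (i : Nat) (st : List Nat) (prs : List (Nat × Nat)) : Prop where
  stfm : ∀ (m : Nat) (h : m < st.length), pvFindClose cs (st[m] + 1) 1 = pvFindClose cs i ((m : Int) + 1)
  stmem : ∀ p ∈ st, p < i ∧ cs[p]? = some '('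
  psound : ∀ q ∈ prs, pvR cs q.1 q.2 ∧ q.1 < q.2 ∧ q.2 < i
  pcomp : ∀ p, p < i → cs[p]? = some '(' → p ∈ st ∨ p ∈ prs.map Prod.fst
  stnd : st.Nodup
  cnd : (pvComps prs).Nodup
  dis : ∀ x ∈ st, x ∉ pvComps prs

theorem pvComps_lt (prs : List (Nat × Nat)) (i : Nat)
    (h : ∀ q ∈ prs, q.1 < q.2 ∧ q.2 < i) (x : Nat) (hx : x ∈ pvComps prs) : x < i := by
  obtain ⟨q, hq, hor⟩ := (pvComps_mem prs x).mp hx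
  have := h q hq
  rcases hor with h | h <;> omega

theorem pvScan_step_open (rest : List Char) (i : Nat) (st : List Nat) (prs : List (Nat × Nat)) :
    pvScanPairs ('(' :: rest) i st prs = pvScanPairs rest (i + 1) (i :: st) prs := by
  simp [pvScanPairs]

theorem pvScan_step_close_nil (rest : List Char) (i : Nat) (prs : List (Nat × Nat)) :
    pvScanPairs (')' :: rest) i [] prs = pvScanPairs rest (i + 1) [] prs := by
  simp [pvScanPairs]

theorem pvScan_step_close_cons (rest : List Char) (i s : Nat) (st : List Nat)
    (prs : List (Nat × Nat)) :
    pvScanPairs (')' :: rest) i (s :: st) prs = pvScanPairs rest (i + 1) st (prs ++ [(s, i)]) := by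
  simp [pvScanPairs]

theorem pvScan_step_other (rest : List Char) (c : Char) (i : Nat) (st : List Nat)
    (prs : List (Nat × Nat)) (h1 : c ≠ '(') (h2 : c ≠ ')') :
    pvScanPairs (c :: rest) i st prs = pvScanPairs rest (i + 1) st prs := by
  simp [pvScanPairs, h1, h2]

theorem pvScan_main (cs : List Char) : ∀ (suf : List Char) (i : Nat) (st : List Nat)
    (prs : List (Nat × Nat)), cs.drop i = suf → i ≤ cs.length →
    PvInv cs i st prs →
    ∃ st', PvInv cs cs.length st' (pvScanPairs suf i st prs) := by
  intro suf
  induction suf with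
  | nil =>
    intro i st prs hdrop hle inv
    have hlen : cs.length - i = 0 := by
      have := congrArg List.length hdrop
      rwa [List.length_drop, List.length_nil] at this
    have : i = cs.length := by omega
    subst this
    exact ⟨st, inv⟩
  | cons c rest ih =>
    intro i st prs hdrop hle inv
    have hci : cs[i]? = some c := by
      have h0 : (cs.drop i)[0]? = some c := by simp [hdrop]
      simpa [List.getElem?_drop] using h0
    have hlt : i < cs.length := (List.getElem?_eq_some_iff.mp hci).1
    have hdrop' : cs.drop (i + 1) = rest := by
      have h1 := congrArg List.tail hdrop
      rwa [List.tail_drop, List.tail_cons] at h1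
    by_cases hc : c = '('
    · subst hc
      rw [pvScan_step_open]
      apply ih (i + 1) (i :: st) prs hdrop' (by omega)
      refine ⟨?_, ?_, ?_, ?_, ?_, inv.cnd, ?_⟩
      · intro m h
        match m with
        | 0 =>
          show pvFindClose cs (i + 1) 1 = pvFindClose cs (i + 1) (((0 : Nat) : Int) + 1)
          norm_num
        | Nat.succ m =>
          have h' : m < st.length := by simpa using h
          have := inv.stfm m h'
          rw [pvFindClose_open cs i (((m : Nat) : Int) + 1) hci] at this
          show pvFindClose cs (st[m] + 1) 1 = pvFindClose cs (i + 1) (((m + 1 : Nat) : Int) + 1)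
          rw [this]; push_cast; ring_nf
      · intro p hp
        rcases List.mem_cons.mp hp with h | h
        · subst h; exact ⟨by omega, hci⟩
        · have := inv.stmem p h; exact ⟨by omega, this.2⟩
      · intro q hq
        have := inv.psound q hq; exact ⟨this.1, this.2.1, by omega⟩
      · intro p hp hop
        by_cases hpi : p = i
        · subst hpi; exact Or.inl (List.mem_cons_self)
        · rcases inv.pcomp p (by omega) hop with h | h
          · exact Or.inl (List.mem_cons_of_mem _ h)
          · exact Or.inr h
      · refine List.nodup_cons.mpr ⟨?_, inv.stnd⟩
        intro hmem
        have := (inv.stmem i hmem).1; omega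
      · intro x hx
        rcases List.mem_cons.mp hx with h | h
        · intro hmem
          have := pvComps_lt prs i (fun q hq => (inv.psound q hq).2) x hmem
          omega
        · exact inv.dis x h
    · by_cases hc2 : c = ')'
      · subst hc2
        cases st with
        | nil =>
          rw [pvScan_step_close_nil]
          apply ih (i + 1) [] prs hdrop' (by omega)
          refine ⟨?_, ?_, ?_, ?_, List.nodup_nil, inv.cnd, ?_⟩
          · intro m h; simp at h
          · intro p hp; simp at hp
          · intro q hq; have := inv.psound q hq; exact ⟨this.1, this.2.1, by omega⟩
          · intro p hp hop
            by_cases hpi : p = i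
            · subst hpi; rw [hci] at hop; simp at hop
            · exact inv.pcomp p (by omega) hop
          · intro x hx; simp at hx
        | cons s st' =>
          rw [pvScan_step_close_cons]
          apply ih (i + 1) st' (prs ++ [(s, i)]) hdrop' (by omega)
          have hsfm : pvFindClose cs (s + 1) 1 = some i := by
            have := inv.stfm 0 (by simp)
            simpa [pvFindClose_close_hit cs i hci] using this
          have hsi : s < i := (inv.stmem s List.mem_cons_self).1
          have hsop : cs[s]? = some '(' := (inv.stmem s List.mem_cons_self).2
          refine ⟨?_, ?_, ?_, ?_, ?_, ?_, ?_⟩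
          · intro m h
            have h' : m + 1 < (s :: st').length := by simpa using Nat.succ_lt_succ h
            have := inv.stfm (m + 1) h'
            rw [pvFindClose_close cs i (((m + 1 : Nat) : Int) + 1) hci (by push_cast; omega)] at this
            show pvFindClose cs (st'[m] + 1) 1 = pvFindClose cs (i + 1) (((m : Nat) : Int) + 1)
            simpa using this.trans (by push_cast; ring_nf)
          · intro p hp
            have := inv.stmem p (List.mem_cons_of_mem _ hp); exact ⟨by omega, this.2⟩
          · intro q hq
            rcases List.mem_append.mp hq with h | h
            · have := inv.psound q h; exact ⟨this.1, this.2.1, by omega⟩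
            · have : q = (s, i) := by simpa using h
              subst this
              exact ⟨⟨hsop, hsfm⟩, hsi, by omega⟩
          · intro p hp hop
            by_cases hpi : p = i
            · subst hpi; rw [hci] at hop; simp at hop
            · rcases inv.pcomp p (by omega) hop with h | h
              · rcases List.mem_cons.mp h with h | h
                · subst h; exact Or.inr (by simp)
                · exact Or.inl h
              · exact Or.inr (by simp [List.map_append]; left; simpa using h)
          · exact (List.nodup_cons.mp inv.stnd).2
          · have hcomps : pvComps (prs ++ [(s, i)]) = pvComps prs ++ [s, i] := by
              simp [pvComps]
            rw [hcomps]
            refine List.Nodup.append inv.cnd ?_ ?_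
            · simp; omega
            · intro x hx hx2
              have hxlt := pvComps_lt prs i (fun q hq => (inv.psound q hq).2) x hx
              simp only [List.mem_cons, List.not_mem_nil, or_false] at hx2
              rcases hx2 with h | h
              · exact inv.dis s List.mem_cons_self (h ▸ hx)
              · omega
          · intro x hx
            have hxs : x ∈ s :: st' := List.mem_cons_of_mem _ hx
            have h1 := inv.dis x hxs
            have hxi : x < i := (inv.stmem x hxs).1
            have hxns : x ≠ s := by
              have := List.nodup_cons.mp inv.stnd
              intro hh; subst hh; exact this.1 hx
            intro hmem
            rw [pvComps_mem] at hmem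
            obtain ⟨q, hq, hor⟩ := hmem
            rcases List.mem_append.mp hq with h | h
            · exact h1 ((pvComps_mem prs x).mpr ⟨q, h, hor⟩)
            · have : q = (s, i) := by simpa using h
              subst this
              rcases hor with h | h
              · exact hxns h
              · omega
      · rw [pvScan_step_other rest c i st prs hc hc2]
        apply ih (i + 1) st prs hdrop' (by omega)
        refine ⟨?_, ?_, ?_, ?_, inv.stnd, inv.cnd, inv.dis⟩
        · intro m h
          have := inv.stfm m h
          rw [pvFindClose_other cs i (((m : Nat) : Int) + 1) c hci hc hc2] at this
          exact this
        · intro p hp; have := inv.stmem p hp; exact ⟨by omega, this.2⟩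
        · intro q hq; have := inv.psound q hq; exact ⟨this.1, this.2.1, by omega⟩
        · intro p hp hop
          by_cases hpi : p = i
          · subst hpi; rw [hci] at hop
            exact absurd (by injection hop) hc
          · exact inv.pcomp p (by omega) hop

theorem pairsA_inv (cs : List Char) : ∃ st', PvInv cs cs.length st' (pvScanPairs cs 0 [] []) := by
  apply pvScan_main cs cs 0 [] [] (by simp) (by omega)
  refine ⟨?_, ?_, ?_, ?_, List.nodup_nil, by simp [pvComps], ?_⟩
  · intro m h; simp at h
  · intro p hp; simp at hp
  · intro q hq; simp at hq
  · intro p hp _; omega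
  · intro x hx; simp at hx

theorem pairsA_mem (cs : List Char) (s e : Nat) :
    (s, e) ∈ pvScanPairs cs 0 [] [] ↔ pvR cs s e := by
  obtain ⟨st', inv⟩ := pairsA_inv cs
  constructor
  · intro h; exact (inv.psound (s, e) h).1
  · rintro ⟨hop, hfm⟩
    have hs : s < cs.length := (List.getElem?_eq_some_iff.mp hop).1
    rcases inv.pcomp s hs hop with h | h
    · obtain ⟨m, hm, hsm⟩ := List.mem_iff_getElem.mp h
      have := inv.stfm m hm
      rw [hsm, pvFindClose_ge cs cs.length _ (le_refl _)] at this
      rw [this] at hfm; cases hfm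
    · obtain ⟨q, hq, hq1⟩ := List.mem_map.mp h
      have := (inv.psound q hq).1
      rw [hq1] at this
      obtain ⟨_, hfm'⟩ := this
      rw [hfm'] at hfm
      injection hfm with hfm
      have : q = (s, e) := by
        obtain ⟨q1, q2⟩ := q
        simp_all
      exact this ▸ hq

theorem pairsA_nodup (cs : List Char) : (pvComps (pvScanPairs cs 0 [] [])).Nodup := by
  obtain ⟨st', inv⟩ := pairsA_inv cs
  exact inv.cnd

-- ---- fold-of-updates machinery ----
theorem pvUpd_length (m : List (List Char)) (p : Nat × Nat) : (pvUpd m p).length = m.length := by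
  simp [pvUpd]

theorem pvFoldUpd_untouched (P : List (Nat × Nat)) (m : List (List Char)) (k : Nat)
    (h : ∀ q ∈ P, q.1 ≠ k ∧ q.2 ≠ k) : (P.foldl pvUpd m)[k]? = m[k]? := by
  induction P generalizing m with
  | nil => rfl
  | cons p P ih =>
    have hp := h p (by simp)
    rw [List.foldl_cons, ih _ (fun q hq => h q (by simp [hq]))]
    simp [pvUpd, hp.1, hp.2]

theorem pvFoldUpd_get (P : List (Nat × Nat)) (m : List (List Char)) (k : Nat)
    (hnd : (pvComps P).Nodup) :
    (P.foldl pvUpd m)[k]? =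
      if P.any (fun q => q.1 == k) then (if k < m.length then some ['ㄱ', ' '] else none)
      else if P.any (fun q => q.2 == k) then (if k < m.length then some [' ', 'ㄴ'] else none)
      else m[k]? := by
  induction P generalizing m with
  | nil => simp
  | cons p P ih =>
    have hcomps : pvComps (p :: P) = p.1 :: p.2 :: pvComps P := by simp [pvComps]
    rw [hcomps] at hnd
    have h12 : p.1 ≠ p.2 := by
      have := List.nodup_cons.mp hnd
      intro h; exact this.1 (h ▸ List.mem_cons_self)
    have h1P : p.1 ∉ pvComps P := by
      have := List.nodup_cons.mp hnd
      exact fun h => this.1 (List.mem_cons_of_mem _ h)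
    have h2P : p.2 ∉ pvComps P := by
      have := (List.nodup_cons.mp (List.nodup_cons.mp hnd).2).1
      exact this
    have hndP : (pvComps P).Nodup := (List.nodup_cons.mp (List.nodup_cons.mp hnd).2).2
    rw [List.foldl_cons]
    by_cases hk1 : k = p.1
    · have hunt : ∀ q ∈ P, q.1 ≠ k ∧ q.2 ≠ k := by
        intro q hq
        constructor <;> intro h <;>
          exact h1P ((pvComps_mem P _).mpr ⟨q, hq, by simp [← hk1, h]⟩)
      rw [pvFoldUpd_untouched P (pvUpd m p) k hunt]
      have e0 : ((p :: P).any fun q => q.1 == k) = true := by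
        simp [List.any_cons, hk1]
      simp only [e0]
      rw [hk1]
      simp [pvUpd, List.getElem?_set, Ne.symm h12]
    · have hk1' : p.1 ≠ k := fun h => hk1 h.symm
      by_cases hk2 : k = p.2
      · have hunt : ∀ q ∈ P, q.1 ≠ k ∧ q.2 ≠ k := by
          intro q hq
          constructor <;> intro h <;>
            exact h2P ((pvComps_mem P _).mpr ⟨q, hq, by simp [← hk2, h]⟩)
        rw [pvFoldUpd_untouched P (pvUpd m p) k hunt]
        have e0 : ((p :: P).any fun q => q.1 == k) = false := by
          rw [List.any_eq_false]
          intro q hq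
          rcases List.mem_cons.mp hq with rfl | hq'
          · simp [hk1']
          · simp [(hunt q hq').1]
        have e1 : ((p :: P).any fun q => q.2 == k) = true := by
          simp [List.any_cons, hk2]
        simp only [e0, e1, Bool.false_eq_true, if_false]
        rw [hk2]
        simp [pvUpd, List.getElem?_set]
      · have hk2' : p.2 ≠ k := fun h => hk2 h.symm
        rw [ih (pvUpd m p) hndP]
        have hm1 : (pvUpd m p)[k]? = m[k]? := by
          simp [pvUpd, List.getElem?_set, hk1', hk2']

        have hml : (pvUpd m p).length = m.length := pvUpd_length m p
        rw [hm1, hml]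
        have e1 : (p.1 == k) = false := by simp [hk1']
        have e2 : (p.2 == k) = false := by simp [hk2']
        simp only [List.any_cons, e1, e2, Bool.false_or]

theorem pvFoldUpd_ext (P Q : List (Nat × Nat)) (m : List (List Char))
    (hmem : ∀ q, q ∈ P ↔ q ∈ Q) (hP : (pvComps P).Nodup) (hQ : (pvComps Q).Nodup) :
    P.foldl pvUpd m = Q.foldl pvUpd m := by
  apply List.ext_getElem?
  intro k
  rw [pvFoldUpd_get P m k hP, pvFoldUpd_get Q m k hQ]
  have hany : ∀ f : (Nat × Nat) → Bool, P.any f = Q.any f := by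
    intro f
    apply Bool.coe_iff_coe.mp
    simp only [List.any_eq_true]
    exact ⟨fun ⟨q, hq, h⟩ => ⟨q, (hmem q).mp hq, h⟩, fun ⟨q, hq, h⟩ => ⟨q, (hmem q).mpr hq, h⟩⟩
  rw [hany, hany]

-- ---- A-side: collapse the inner funcs fold into one conditional update ----
theorem pvUpd_idem (m : List (List Char)) (p : Nat × Nat) :
    pvUpd (pvUpd m p) p = pvUpd m p := by
  apply List.ext_getElem?
  intro k
  simp only [pvUpd, List.getElem?_set, List.length_set]
  split_ifs <;> simp_all

theorem pvInner_collapse (cs : List Char) (s e : Nat) :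
    ∀ (l : List String) (m : List (List Char)),
      l.foldl (fun m f => if pvChk cs s f then (m.set s ['ㄱ', ' ']).set e [' ', 'ㄴ'] else m) m =
        if l.any (fun f => pvChk cs s f) then pvUpd m (s, e) else m := by
  intro l
  induction l with
  | nil => intro m; simp
  | cons f l ih =>
    intro m
    rw [List.foldl_cons, List.any_cons]
    by_cases hf : pvChk cs s f
    · rw [if_pos hf, ih]
      have : (pvUpd m (s, e)) = ((m.set s ['ㄱ', ' ']).set e [' ', 'ㄴ']) := rfl
      rw [← this]
      by_cases ha : l.any (fun f => pvChk cs s f)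
      · simp [ha, hf, pvUpd_idem m (s, e)]
      · simp [ha, hf]
    · rw [if_neg hf, ih]
      simp [hf]

-- ---- B-side: the loop as a fold of updates ----
def pvG (cs : List Char) (i : Nat) : Option (Nat × Nat) :=
  if (cs[i]? == some '(') && pvCond cs i then (pvFindClose cs (i + 1) 1).map (fun j => (i, j))
  else none

theorem pvLoop_step (cs : List Char) (c : Char) (rest : List Char) (i : Nat)
    (out : List (List Char)) :
    pvReplaceLoop cs (c :: rest) i out = pvReplaceLoop cs rest (i + 1)
      (if c = '(' then
        (if pvFuncs.any (fun f => pvChk cs i f) then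
          match pvFindClose cs (i + 1) 1 with
          | some j => (out.set i ['ㄱ', ' ']).set j [' ', 'ㄴ']
          | none => out
        else out)
      else out) := rfl

theorem pvLoop_eq (cs : List Char) : ∀ (suf : List Char) (i : Nat) (out : List (List Char)),
    cs.drop i = suf →
    pvReplaceLoop cs suf i out = ((List.range' i suf.length).filterMap (pvG cs)).foldl pvUpd out := by
  intro suf
  induction suf with
  | nil => intro i out _; rfl
  | cons c rest ih =>
    intro i out hdrop
    have hci : cs[i]? = some c := by
      have h0 : (cs.drop i)[0]? = some c := by simp [hdrop]
      simpa [List.getElem?_drop] using h0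
    have hdrop' : cs.drop (i + 1) = rest := by
      have h1 := congrArg List.tail hdrop
      rwa [List.tail_drop, List.tail_cons] at h1
    have hstep : (if c = '(' then
        (if pvFuncs.any (fun f => pvChk cs i f) then
          match pvFindClose cs (i + 1) 1 with
          | some j => (out.set i ['ㄱ', ' ']).set j [' ', 'ㄴ']
          | none => out
        else out)
      else out) = (match pvG cs i with | some p => pvUpd out p | none => out) := by
      unfold pvG pvCond
      rw [hci]
      by_cases hc : c = '(' <;> by_cases hcond : pvFuncs.any (fun f => pvChk cs i f) <;>
        cases hfm : pvFindClose cs (i + 1) 1 <;> simp [hc, hcond, hfm, pvUpd]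

    rw [pvLoop_step, hstep, ih (i + 1) _ hdrop', List.length_cons, List.range'_succ,
      List.filterMap_cons]
    cases hg : pvG cs i with
    | none => rfl
    | some p => rw [show (match some p with | some p => pvUpd out p | none => out) = pvUpd out p from rfl, ← List.foldl_cons]

-- ---- comps-nodup for the B-side list ----
theorem pvComps_nodup_build (Q : List (Nat × Nat))
    (h1 : Q.Pairwise (fun p q => p.1 ≠ q.1 ∧ p.1 ≠ q.2 ∧ p.2 ≠ q.1 ∧ p.2 ≠ q.2))
    (h2 : ∀ q ∈ Q, q.1 ≠ q.2) : (pvComps Q).Nodup := by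
  induction Q with
  | nil => simp [pvComps]
  | cons p Q ih =>
    have hcomps : pvComps (p :: Q) = p.1 :: p.2 :: pvComps Q := by simp [pvComps]
    rw [hcomps]
    obtain ⟨hp, h1'⟩ := List.pairwise_cons.mp h1
    refine List.nodup_cons.mpr ⟨?_, List.nodup_cons.mpr ⟨?_, ih h1' (fun q hq => h2 q (by simp [hq]))⟩⟩
    · intro h
      rcases List.mem_cons.mp h with h | h
      · exact h2 p (by simp) h
      · obtain ⟨q, hq, hor⟩ := (pvComps_mem Q _).mp h
        have := hp q hq
        rcases hor with h | h
        · exact this.1 h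
        · exact this.2.1 h
    · intro h
      obtain ⟨q, hq, hor⟩ := (pvComps_mem Q _).mp h
      have := hp q hq
      rcases hor with h | h
      · exact this.2.2.1 h
      · exact this.2.2.2 h

theorem pvComps_snd_inj (s s' e : Nat) :
    ∀ (P : List (Nat × Nat)), (pvComps P).Nodup → (s, e) ∈ P → (s', e) ∈ P → s = s' := by
  intro P
  induction P with
  | nil => intro _ h; simp at h
  | cons p P ih =>
    intro hnd hm hm'
    have hcomps : pvComps (p :: P) = p.1 :: p.2 :: pvComps P := by simp [pvComps]
    rw [hcomps] at hnd
    have h2P : p.2 ∉ pvComps P := (List.nodup_cons.mp (List.nodup_cons.mp hnd).2).1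
    have hndP : (pvComps P).Nodup := (List.nodup_cons.mp (List.nodup_cons.mp hnd).2).2
    rcases List.mem_cons.mp hm with h | h <;> rcases List.mem_cons.mp hm' with h' | h'
    · rw [← h] at h'; exact (Prod.mk.injEq .. ▸ h'.symm : _ ∧ _).1.symm ▸ rfl
    · exfalso
      have : e = p.2 := by rw [← h]
      exact h2P ((pvComps_mem P p.2).mpr ⟨(s', e), h', by simp [← this]⟩)
    · exfalso
      have : e = p.2 := by rw [← h']
      exact h2P ((pvComps_mem P p.2).mpr ⟨(s, e), h, by simp [← this]⟩)
    · exact ih hndP h h'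

theorem pvR_snd_inj (cs : List Char) (s s' e : Nat) (h : pvR cs s e) (h' : pvR cs s' e) :
    s = s' := by
  exact pvComps_snd_inj s s' e (pvScanPairs cs 0 [] []) (pairsA_nodup cs)
    ((pairsA_mem cs s e).mpr h) ((pairsA_mem cs s' e).mpr h')

theorem pvR_chars (cs : List Char) (s e : Nat) (h : pvR cs s e) :
    cs[s]? = some '(' ∧ cs[e]? = some ')' ∧ s < e ∧ e < cs.length := by
  obtain ⟨hop, hfm⟩ := h
  have := pvFindClose_facts cs (s + 1) 1 e (by omega) hfm
  exact ⟨hop, this.2.2, by omega, this.2.1⟩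

theorem pvG_some (cs : List Char) (i : Nat) (q : Nat × Nat) :
    pvG cs i = some q ↔
      q.1 = i ∧ cs[i]? = some '(' ∧ pvCond cs i = true ∧ pvFindClose cs (i + 1) 1 = some q.2 := by
  obtain ⟨a, b⟩ := q
  unfold pvG
  by_cases hb1 : cs[i]? = some '(' <;> by_cases hb2 : pvCond cs i <;>
    cases hfm : pvFindClose cs (i + 1) 1 <;>
    · simp [hb1, hb2, hfm]
      try (intro; constructor <;> (intro h; exact h.symm))

-- the B-side pair list
theorem pvQ_mem (cs : List Char) (q : Nat × Nat) :
    q ∈ (List.range' 0 cs.length).filterMap (pvG cs) ↔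
      pvR cs q.1 q.2 ∧ pvCond cs q.1 = true := by
  rw [List.mem_filterMap]
  constructor
  · rintro ⟨i, _, hg⟩
    obtain ⟨h1, h2, h3, h4⟩ := (pvG_some cs i q).mp hg
    exact ⟨⟨h1 ▸ h2, h1 ▸ h4⟩, h1 ▸ h3⟩
  · rintro ⟨⟨hop, hfm⟩, hcond⟩
    refine ⟨q.1, ?_, (pvG_some cs q.1 q).mpr ⟨rfl, hop, hcond, hfm⟩⟩
    rw [List.mem_range'_1]
    exact ⟨Nat.zero_le _, by simpa using (List.getElem?_eq_some_iff.mp hop).1⟩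

theorem pvQ_nodup (cs : List Char) :
    (pvComps ((List.range' 0 cs.length).filterMap (pvG cs))).Nodup := by
  set Q := (List.range' 0 cs.length).filterMap (pvG cs) with hQ
  have hmemR : ∀ q ∈ Q, pvR cs q.1 q.2 := fun q hq => ((pvQ_mem cs q).mp hq).1
  have hpair1 : Q.Pairwise (fun p q => p.1 ≠ q.1) := by
    refine List.Pairwise.filterMap (pvG cs) ?_ (List.pairwise_lt_range' ..)
    intro a b hab p hp q hq
    have ha := ((pvG_some cs a p).mp hp).1
    have hb := ((pvG_some cs b q).mp hq).1
    omega
  apply pvComps_nodup_build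
  · refine hpair1.imp_of_mem ?_
    intro p q hp hq hne
    have hpR := pvR_chars cs p.1 p.2 (hmemR p hp)
    have hqR := pvR_chars cs q.1 q.2 (hmemR q hq)
    refine ⟨hne, ?_, ?_, ?_⟩
    · intro h; rw [h] at hpR; rw [hpR.1] at hqR; simp at hqR
    · intro h; rw [h] at hpR; rw [hqR.1] at hpR; simp at hpR
    · intro h; exact hne (pvR_snd_inj cs p.1 q.1 p.2 (hmemR p hp) (h ▸ hmemR q hq))
  · intro q hq
    have h := pvR_chars cs q.1 q.2 (hmemR q hq)
    omega

theorem pvCore_eq (cs : List Char) (m0 : List (List Char)) :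
    (pvScanPairs cs 0 [] []).foldl (fun m p =>
      pvFuncs.foldl (fun m f =>
        if pvChk cs p.1 f then (m.set p.1 ['ㄱ', ' ']).set p.2 [' ', 'ㄴ'] else m) m) m0 =
    pvReplaceLoop cs cs 0 m0 := by
  set P := pvScanPairs cs 0 [] [] with hPdef
  have step1 : P.foldl (fun m p =>
      pvFuncs.foldl (fun m f =>
        if pvChk cs p.1 f then (m.set p.1 ['ㄱ', ' ']).set p.2 [' ', 'ㄴ'] else m) m) m0 =
      P.foldl (fun m p => if pvCond cs p.1 then pvUpd m p else m) m0 := by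
    apply PySem.List.foldl_congr_mem
    intro m q _
    rw [pvInner_collapse cs q.1 q.2 pvFuncs m]
    rfl
  rw [step1, ← List.foldl_filter, pvLoop_eq cs cs 0 m0 (by simp)]
  apply pvFoldUpd_ext
  · intro q
    rw [List.mem_filter, pvQ_mem cs q]
    constructor
    · rintro ⟨hmem, hcond⟩
      exact ⟨(pairsA_mem cs q.1 q.2).mp hmem, hcond⟩
    · rintro ⟨hR, hcond⟩
      exact ⟨(pairsA_mem cs q.1 q.2).mpr hR, hcond⟩
  · exact List.Nodup.sublist (List.Sublist.flatMap List.filter_sublist _) (pairsA_nodup cs)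
  · exact pvQ_nodup cs

-- ===== VERDICT (by name: the statement is the Claim_ definition above) =====
theorem replace_parentheses_with_conditions_spec : Claim_equal_replace_parentheses_with_conditions := by
  intro sql _
  unfold Spec_replace_parentheses_with_conditions
  unfold replace_parentheses_with_conditions replace_parentheses_with_conditions_alt
  exact congrArg (fun l => String.ofList l.flatten)
    (pvCore_eq sql.toList (sql.toList.map (fun c => [c])))
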